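-- pv_equiv track=rewrite | github.com/cekkr/dummygfx | dummygfx.py | pixels_in_triangle
-- ===== SOURCE A (Python) =====
-- def sign(p1, p2, p3):
--     return ((p1[0] - p3[0]) * (p2[1] - p3[1])) - ((p2[0] - p3[0]) * (p1[1] - p3[1]))
--
-- def point_in_triangle(pt, v1, v2, v3):
--     d1 = sign(pt, v1, v2)
--     d2 = sign(pt, v2, v3)
--     d3 = sign(pt, v3, v1)
--     has_neg = (d1 < 0) or (d2 < 0) or (d3 < 0)
--     has_pos = (d1 > 0) or (d2 > 0) or (d3 > 0)
--     return not (has_neg and has_pos)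
--
-- def pixels_in_triangle(v1, v2, v3):
--     v1 = [int(v1[0]), int(v1[1])]
--     v2 = [int(v2[0]), int(v2[1])]
--     v3 = [int(v3[0]), int(v3[1])]
--
--     # Determine the bounding box of the triangle
--     min_x = min(v1[0], v2[0], v3[0])
--     max_x = max(v1[0], v2[0], v3[0])
--     min_y = min(v1[1], v2[1], v3[1])
--     max_y = max(v1[1], v2[1], v3[1])
--
--     pixels = []
--     for x in range(min_x, max_x + 1):
--         for y in range(min_y, max_y + 1):
--             if point_in_triangle((x, y), v1, v2, v3):
--                 pixels.append((x, y))
--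
--     return pixels
-- ===== SOURCE B (Python) =====
-- def pixels_in_triangle(v1, v2, v3):
--     ax, ay = int(v1[0]), int(v1[1])
--     bx, by = int(v2[0]), int(v2[1])
--     cx, cy = int(v3[0]), int(v3[1])
--
--     def inside(x, y):
--         d1 = (x - bx) * (ay - by) - (ax - bx) * (y - by)
--         d2 = (x - cx) * (by - cy) - (bx - cx) * (y - cy)
--         d3 = (x - ax) * (cy - ay) - (cx - ax) * (y - ay)
--         return (d1 >= 0 and d2 >= 0 and d3 >= 0) or (d1 <= 0 and d2 <= 0 and d3 <= 0)
--
--     min_x, max_x = min(ax, bx, cx), max(ax, bx, cx)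
--     min_y, max_y = min(ay, by, cy), max(ay, by, cy)
--
--     pixels = []
--     for x in range(min_x, max_x + 1):
--         # the inside set of a column is one contiguous run of y values:
--         # find its first and last element, then emit the whole run at once
--         lo = min_y
--         while lo <= max_y and not inside(x, lo):
--             lo += 1
--         if lo > max_y:
--             continue
--         hi = max_y
--         while hi > lo and not inside(x, hi):
--             hi -= 1
--         pixels.extend((x, y) for y in range(lo, hi + 1))
--     return pixels
-- ===== Notes on version B (the rewrite author's own statement) =====
-- stated objective: alternative
-- what changed: Instead of testing every (x,y) of the bounding box against the triangle, B scans each column only until it finds the two endpoints of the (provably single, contiguous) inside run and emits the whole run at once, skipping the per-pixel triangle test for the run's interior.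
import Mathlib
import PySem

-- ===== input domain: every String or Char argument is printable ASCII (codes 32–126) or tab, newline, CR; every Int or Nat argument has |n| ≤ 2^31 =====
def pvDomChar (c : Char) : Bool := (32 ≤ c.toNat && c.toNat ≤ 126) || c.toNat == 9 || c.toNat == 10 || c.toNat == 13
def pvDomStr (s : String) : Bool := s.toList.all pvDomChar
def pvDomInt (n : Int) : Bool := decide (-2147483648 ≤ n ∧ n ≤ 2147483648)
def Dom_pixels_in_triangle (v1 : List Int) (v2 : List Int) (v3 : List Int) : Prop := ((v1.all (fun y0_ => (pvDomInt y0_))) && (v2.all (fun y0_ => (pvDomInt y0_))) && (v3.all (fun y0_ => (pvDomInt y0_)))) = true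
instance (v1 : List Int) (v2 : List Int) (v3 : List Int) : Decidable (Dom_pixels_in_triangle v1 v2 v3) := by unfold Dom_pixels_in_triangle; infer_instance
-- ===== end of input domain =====

-- B replaces A's per-pixel inside test over the whole bounding box by a per-column scan that
-- finds the endpoints of the (single, contiguous) inside run and emits the run wholesale
-- (objective: alternative algorithm; identical return value).

-- ===== PORT A =====
def pvSign (p1 p2 p3 : Int × Int) : Int :=
  ((p1.1 - p3.1) * (p2.2 - p3.2)) - ((p2.1 - p3.1) * (p1.2 - p3.2))

def pvPointInTriangle (pt v1 v2 v3 : Int × Int) : Bool :=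
  let d1 := pvSign pt v1 v2
  let d2 := pvSign pt v2 v3
  let d3 := pvSign pt v3 v1
  let has_neg := decide (d1 < 0) || decide (d2 < 0) || decide (d3 < 0)
  let has_pos := decide (d1 > 0) || decide (d2 > 0) || decide (d3 > 0)
  !(has_neg && has_pos)

def pixels_in_triangle (v1 : List Int) (v2 : List Int) (v3 : List Int) : List (Int × Int) :=
  let a : Int × Int := (PySem.List.pyGetD v1 0 0, PySem.List.pyGetD v1 1 0)
  let b : Int × Int := (PySem.List.pyGetD v2 0 0, PySem.List.pyGetD v2 1 0)
  let c : Int × Int := (PySem.List.pyGetD v3 0 0, PySem.List.pyGetD v3 1 0)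
  let min_x := min a.1 (min b.1 c.1)
  let max_x := max a.1 (max b.1 c.1)
  let min_y := min a.2 (min b.2 c.2)
  let max_y := max a.2 (max b.2 c.2)
  (PySem.List.pyRange min_x (max_x + 1) 1).foldl (fun px x =>
    (PySem.List.pyRange min_y (max_y + 1) 1).foldl (fun px y =>
      if pvPointInTriangle (x, y) a b c then px ++ [(x, y)] else px) px) []

-- ===== PORT B =====
def pvInside (ax ay bx b_y cx cy x y : Int) : Bool :=
  let d1 := (x - bx) * (ay - b_y) - (ax - bx) * (y - b_y)
  let d2 := (x - cx) * (b_y - cy) - (bx - cx) * (y - cy)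
  let d3 := (x - ax) * (cy - ay) - (cx - ax) * (y - ay)
  (decide (d1 ≥ 0) && decide (d2 ≥ 0) && decide (d3 ≥ 0)) ||
  (decide (d1 ≤ 0) && decide (d2 ≤ 0) && decide (d3 ≤ 0))

-- 'lo = min_y; while lo <= max_y and not inside(x, lo): lo += 1'
def pvFindLo (p : Int → Bool) (lo max_y : Int) : Int :=
  if h : lo ≤ max_y ∧ ¬ p lo then pvFindLo p (lo + 1) max_y else lo
termination_by (max_y + 1 - lo).toNat
decreasing_by omega

-- 'hi = max_y; while hi > lo and not inside(x, hi): hi -= 1'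
def pvFindHi (p : Int → Bool) (hi lo : Int) : Int :=
  if h : lo < hi ∧ ¬ p hi then pvFindHi p (hi - 1) lo else hi
termination_by (hi - lo).toNat
decreasing_by omega

def pixels_in_triangle_alt (v1 : List Int) (v2 : List Int) (v3 : List Int) : List (Int × Int) :=
  let ax := PySem.List.pyGetD v1 0 0
  let ay := PySem.List.pyGetD v1 1 0
  let bx := PySem.List.pyGetD v2 0 0
  let b_y := PySem.List.pyGetD v2 1 0
  let cx := PySem.List.pyGetD v3 0 0
  let cy := PySem.List.pyGetD v3 1 0
  let min_x := min ax (min bx cx)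
  let max_x := max ax (max bx cx)
  let min_y := min ay (min b_y cy)
  let max_y := max ay (max b_y cy)
  (PySem.List.pyRange min_x (max_x + 1) 1).foldl (fun px x =>
    let lo := pvFindLo (fun y => pvInside ax ay bx b_y cx cy x y) min_y max_y
    if lo > max_y then px
    else
      let hi := pvFindHi (fun y => pvInside ax ay bx b_y cx cy x y) max_y lo
      px ++ (PySem.List.pyRange lo (hi + 1) 1).map (fun y => (x, y))) []

-- ===== PRECONDITION & SPEC =====
-- Pre_: A indexes v[0] and v[1] of each vertex, so each list needs length ≥ 2 (else IndexError).
def Pre_pixels_in_triangle (v1 : List Int) (v2 : List Int) (v3 : List Int) : Prop :=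
  2 ≤ v1.length ∧ 2 ≤ v2.length ∧ 2 ≤ v3.length
instance (v1 : List Int) (v2 : List Int) (v3 : List Int) : Decidable (Pre_pixels_in_triangle v1 v2 v3) := by unfold Pre_pixels_in_triangle; infer_instance

def pvWitness_pixels_in_triangle : List Int × List Int × List Int := ([0, 0], [2, 0], [0, 2])

def Spec_pixels_in_triangle (v1 : List Int) (v2 : List Int) (v3 : List Int) (out : List (Int × Int)) : Prop := out = pixels_in_triangle_alt v1 v2 v3
instance (v1 : List Int) (v2 : List Int) (v3 : List Int) (out : List (Int × Int)) : Decidable (Spec_pixels_in_triangle v1 v2 v3 out) := by unfold Spec_pixels_in_triangle; infer_instance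

-- ===== CLAIM (what is proved, stated in full; the proofs are below) =====
def Claim_equal_pixels_in_triangle : Prop := ∀ (v1 : List Int) (v2 : List Int) (v3 : List Int), Dom_pixels_in_triangle v1 v2 v3 → Pre_pixels_in_triangle v1 v2 v3 → Spec_pixels_in_triangle v1 v2 v3 (pixels_in_triangle v1 v2 v3)

-- ===== LEMMAS AND PROOFS =====

theorem pvFindLo_ge (p : Int → Bool) (lo M : Int) : lo ≤ pvFindLo p lo M := by
  fun_induction pvFindLo with
  | case1 h ih => omega
  | case2 h => omega

theorem pvFindLo_false (p : Int → Bool) (lo M : Int) :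
    ∀ y, lo ≤ y → y < pvFindLo p lo M → p y = false := by
  fun_induction pvFindLo with
  | case1 lo h ih =>
      intro y hy1 hy2
      rcases eq_or_lt_of_le hy1 with rfl | hlt
      · simpa using h.2
      · exact ih y (by omega) hy2
  | case2 lo h => intro y h1 h2; omega

theorem pvFindLo_true (p : Int → Bool) (lo M : Int) :
    pvFindLo p lo M ≤ M → p (pvFindLo p lo M) = true := by
  fun_induction pvFindLo with
  | case1 lo hc ih => exact ih
  | case2 lo hc =>
      intro h
      by_cases hp : p lo
      · exact hp
      · exact absurd ⟨h, hp⟩ hc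

theorem pvFindHi_le (p : Int → Bool) (hi lo : Int) : pvFindHi p hi lo ≤ hi := by
  fun_induction pvFindHi with
  | case1 h ih => omega
  | case2 h => omega

theorem pvFindHi_ge (p : Int → Bool) (hi lo : Int) : lo ≤ hi → lo ≤ pvFindHi p hi lo := by
  fun_induction pvFindHi with
  | case1 hi h ih => intro _; exact ih (by omega)
  | case2 hi h => intro h2; omega

theorem pvFindHi_false (p : Int → Bool) (hi lo : Int) :
    ∀ y, pvFindHi p hi lo < y → y ≤ hi → p y = false := by
  fun_induction pvFindHi with
  | case1 hi h ih =>
      intro y hy1 hy2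
      rcases eq_or_lt_of_le hy2 with rfl | hlt
      · simpa using h.2
      · exact ih y hy1 (by omega)
  | case2 hi h => intro y h1 h2; omega

theorem pvFindHi_true (p : Int → Bool) (hi lo : Int) (hlo : p lo = true) :
    lo ≤ hi → p (pvFindHi p hi lo) = true := by
  fun_induction pvFindHi with
  | case1 hi hc ih => intro _; exact ih (by omega)
  | case2 hi hc =>
      intro h
      by_cases hp : p hi
      · exact hp
      · have : ¬ lo < hi := fun hl => hc ⟨hl, hp⟩
        have : hi = lo := by omega
        rw [this]; exact hlo

theorem filter_range_run (p : Int → Bool) (lo hi : Int) :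
    ∀ (m M : Int), hi ≤ M →
    (∀ y, m ≤ y → y ≤ M → (p y = true ↔ (lo ≤ y ∧ y ≤ hi))) →
    (PySem.List.pyRange m (M + 1) 1).filter p = PySem.List.pyRange (max m lo) (hi + 1) 1 := by
  intro m M
  induction hn : (M + 1 - m).toNat generalizing m with
  | zero =>
      intro hhi hiff
      rw [PySem.List.pyRange_one_eq_nil (by omega), PySem.List.pyRange_one_eq_nil (by omega)]
      rfl
  | succ n ih =>
      intro hhi hiff
      have hm : m < M + 1 := by omega
      rw [PySem.List.pyRange_one_cons hm]
      by_cases hp : p m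
      · have hmb : lo ≤ m ∧ m ≤ hi := (hiff m le_rfl (by omega)).mp hp
        have hrec := ih (m + 1) (by omega) hhi (fun y h1 h2 => hiff y (by omega) h2)
        simp only [List.filter_cons, hp]
        rw [hrec]
        have h1 : max m lo = m := by omega
        have h2 : max (m + 1) lo = m + 1 := by omega
        rw [h1, h2, ← PySem.List.pyRange_one_cons (show m < hi+1 by omega)]
        simp
      · have hmb : ¬ (lo ≤ m ∧ m ≤ hi) := fun hc => hp ((hiff m le_rfl (by omega)).mpr hc)
        have hrec := ih (m + 1) (by omega) hhi (fun y h1 h2 => hiff y (by omega) h2)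
        simp only [List.filter_cons, hp]
        rw [hrec]
        by_cases hcase : lo ≤ m
        · -- then m > hi, both ranges empty
          have : hi < m := by omega
          rw [PySem.List.pyRange_one_eq_nil (show hi+1 ≤ max (m+1) lo by omega), PySem.List.pyRange_one_eq_nil (show hi+1 ≤ max m lo by omega)]
          simp
        · have h1 : max m lo = lo := by omega
          have h2 : max (m + 1) lo = lo := by omega
          rw [h1, h2]
          simp

theorem affine_nonneg (A B y1 y2 y : Int) (h1 : 0 ≤ A + B * y1) (h2 : 0 ≤ A + B * y2)
    (hy1 : y1 ≤ y) (hy2 : y ≤ y2) : 0 ≤ A + B * y := by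
  by_cases hb : 0 ≤ B
  · nlinarith
  · nlinarith

theorem affine_nonpos (A B y1 y2 y : Int) (h1 : A + B * y1 ≤ 0) (h2 : A + B * y2 ≤ 0)
    (hy1 : y1 ≤ y) (hy2 : y ≤ y2) : A + B * y ≤ 0 := by
  by_cases hb : 0 ≤ B
  · nlinarith
  · nlinarith

theorem affine_interval (A1 B1 A2 B2 A3 B3 : Int) (hB : B1 + B2 + B3 = 0)
    (y1 y2 y : Int) (hy1 : y1 ≤ y) (hy2 : y ≤ y2)
    (h1 : (0 ≤ A1 + B1 * y1 ∧ 0 ≤ A2 + B2 * y1 ∧ 0 ≤ A3 + B3 * y1) ∨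
          (A1 + B1 * y1 ≤ 0 ∧ A2 + B2 * y1 ≤ 0 ∧ A3 + B3 * y1 ≤ 0))
    (h2 : (0 ≤ A1 + B1 * y2 ∧ 0 ≤ A2 + B2 * y2 ∧ 0 ≤ A3 + B3 * y2) ∨
          (A1 + B1 * y2 ≤ 0 ∧ A2 + B2 * y2 ≤ 0 ∧ A3 + B3 * y2 ≤ 0)) :
    (0 ≤ A1 + B1 * y ∧ 0 ≤ A2 + B2 * y ∧ 0 ≤ A3 + B3 * y) ∨
    (A1 + B1 * y ≤ 0 ∧ A2 + B2 * y ≤ 0 ∧ A3 + B3 * y ≤ 0) := by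
  rcases h1 with ⟨p1, p2, p3⟩ | ⟨p1, p2, p3⟩ <;> rcases h2 with ⟨q1, q2, q3⟩ | ⟨q1, q2, q3⟩
  · exact Or.inl ⟨affine_nonneg _ _ _ _ _ p1 q1 hy1 hy2,
      affine_nonneg _ _ _ _ _ p2 q2 hy1 hy2, affine_nonneg _ _ _ _ _ p3 q3 hy1 hy2⟩
  · -- mixed: all ≥ 0 at y1, all ≤ 0 at y2; the constant sum forces everything to vanish
    have e1 : A1 + B1 * y1 = 0 := by nlinarith
    have e2 : A2 + B2 * y1 = 0 := by nlinarith
    have e3 : A3 + B3 * y1 = 0 := by nlinarith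
    have f1 : A1 + B1 * y2 = 0 := by nlinarith
    have f2 : A2 + B2 * y2 = 0 := by nlinarith
    have f3 : A3 + B3 * y2 = 0 := by nlinarith
    rcases eq_or_lt_of_le (le_trans hy1 hy2) with rfl | hlt
    · left
      have : y = y1 := by omega
      subst this; exact ⟨by omega, by omega, by omega⟩
    · have b1 : B1 = 0 := by
        have : B1 * (y2 - y1) = 0 := by ring_nf; nlinarith
        rcases mul_eq_zero.mp this with h | h
        · exact h
        · omega
      have b2 : B2 = 0 := by
        have : B2 * (y2 - y1) = 0 := by ring_nf; nlinarith
        rcases mul_eq_zero.mp this with h | h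
        · exact h
        · omega
      have b3 : B3 = 0 := by
        have : B3 * (y2 - y1) = 0 := by ring_nf; nlinarith
        rcases mul_eq_zero.mp this with h | h
        · exact h
        · omega
      left
      constructor
      · nlinarith
      constructor
      · nlinarith
      · nlinarith
  · -- mixed the other way
    have e1 : A1 + B1 * y1 = 0 := by nlinarith
    have e2 : A2 + B2 * y1 = 0 := by nlinarith
    have e3 : A3 + B3 * y1 = 0 := by nlinarith
    have f1 : A1 + B1 * y2 = 0 := by nlinarith
    have f2 : A2 + B2 * y2 = 0 := by nlinarith
    have f3 : A3 + B3 * y2 = 0 := by nlinarith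
    rcases eq_or_lt_of_le (le_trans hy1 hy2) with rfl | hlt
    · left
      have : y = y1 := by omega
      subst this; exact ⟨by omega, by omega, by omega⟩
    · have b1 : B1 = 0 := by
        have : B1 * (y2 - y1) = 0 := by ring_nf; nlinarith
        rcases mul_eq_zero.mp this with h | h
        · exact h
        · omega
      have b2 : B2 = 0 := by
        have : B2 * (y2 - y1) = 0 := by ring_nf; nlinarith
        rcases mul_eq_zero.mp this with h | h
        · exact h
        · omega
      have b3 : B3 = 0 := by
        have : B3 * (y2 - y1) = 0 := by ring_nf; nlinarith
        rcases mul_eq_zero.mp this with h | h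
        · exact h
        · omega
      left
      constructor
      · nlinarith
      constructor
      · nlinarith
      · nlinarith
  · exact Or.inr ⟨affine_nonpos _ _ _ _ _ p1 q1 hy1 hy2,
      affine_nonpos _ _ _ _ _ p2 q2 hy1 hy2, affine_nonpos _ _ _ _ _ p3 q3 hy1 hy2⟩

theorem pvInside_convex (ax ay bx b_y cx cy x : Int) (y1 y2 y : Int)
    (hy1 : y1 ≤ y) (hy2 : y ≤ y2)
    (h1 : pvInside ax ay bx b_y cx cy x y1 = true)
    (h2 : pvInside ax ay bx b_y cx cy x y2 = true) :
    pvInside ax ay bx b_y cx cy x y = true := by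
  simp only [pvInside, Bool.or_eq_true, Bool.and_eq_true, decide_eq_true_eq, ge_iff_le] at h1 h2 ⊢
  have e1 : ∀ t : Int, (x - bx) * (ay - b_y) - (ax - bx) * (t - b_y) =
      (x - bx) * (ay - b_y) + (ax - bx) * b_y + -(ax - bx) * t := by intro t; ring
  have e2 : ∀ t : Int, (x - cx) * (b_y - cy) - (bx - cx) * (t - cy) =
      (x - cx) * (b_y - cy) + (bx - cx) * cy + -(bx - cx) * t := by intro t; ring
  have e3 : ∀ t : Int, (x - ax) * (cy - ay) - (cx - ax) * (t - ay) =
      (x - ax) * (cy - ay) + (cx - ax) * ay + -(cx - ax) * t := by intro t; ring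
  rw [e1 y1, e2 y1, e3 y1] at h1
  rw [e1 y2, e2 y2, e3 y2] at h2
  rw [e1 y, e2 y, e3 y]
  have key := affine_interval ((x - bx) * (ay - b_y) + (ax - bx) * b_y) (-(ax - bx))
      ((x - cx) * (b_y - cy) + (bx - cx) * cy) (-(bx - cx))
      ((x - ax) * (cy - ay) + (cx - ax) * ay) (-(cx - ax)) (by ring) y1 y2 y hy1 hy2
      (by tauto) (by tauto)
  tauto

theorem pointInTriangle_eq_inside (ax ay bx b_y cx cy x y : Int) :
    pvPointInTriangle (x, y) (ax, ay) (bx, b_y) (cx, cy) = pvInside ax ay bx b_y cx cy x y := by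
  simp only [pvPointInTriangle, pvSign, pvInside]
  rw [Bool.eq_iff_iff]
  simp only [Bool.or_eq_true, Bool.and_eq_true, Bool.not_eq_true', Bool.and_eq_false_iff,
    Bool.or_eq_false_iff, decide_eq_true_eq, decide_eq_false_iff_not, not_lt, ge_iff_le]

-- generic column lemma for a convex predicate
theorem column_eq_gen (p : Int → Bool)
    (hconv : ∀ (y1 y2 y : Int), y1 ≤ y → y ≤ y2 → p y1 = true → p y2 = true → p y = true)
    (min_y max_y : Int) :
    ((PySem.List.pyRange min_y (max_y + 1) 1).filter p) =
      (if pvFindLo p min_y max_y > max_y then []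
       else PySem.List.pyRange (pvFindLo p min_y max_y)
              (pvFindHi p max_y (pvFindLo p min_y max_y) + 1) 1) := by
  set lo := pvFindLo p min_y max_y with hlo
  by_cases hc : lo > max_y
  · rw [if_pos hc]
    rw [List.filter_eq_nil_iff]
    intro y hy
    have hmem := (PySem.List.mem_pyRange_one).mp hy
    simp only [Bool.not_eq_true]
    exact pvFindLo_false p min_y max_y y hmem.1 (by omega)
  · rw [if_neg hc]
    push Not at hc
    have hplo : p lo = true := pvFindLo_true p min_y max_y hc
    set hi := pvFindHi p max_y lo with hhi
    have hge : min_y ≤ lo := pvFindLo_ge p min_y max_y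
    have hhile : hi ≤ max_y := pvFindHi_le p max_y lo
    have hhige : lo ≤ hi := pvFindHi_ge p max_y lo hc
    have hphi : p hi = true := pvFindHi_true p max_y lo hplo hc
    have hiff : ∀ y, min_y ≤ y → y ≤ max_y → (p y = true ↔ (lo ≤ y ∧ y ≤ hi)) := by
      intro y h1 h2
      constructor
      · intro hp
        constructor
        · by_contra hlt
          push Not at hlt
          have := pvFindLo_false p min_y max_y y h1 hlt
          simp [hp] at this
        · by_contra hlt
          push Not at hlt
          have := pvFindHi_false p max_y lo y hlt h2
          simp [hp] at this
      · intro ⟨ha, hb⟩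
        exact hconv lo hi y ha hb hplo hphi
    have := filter_range_run p lo hi min_y max_y hhile hiff
    rw [this]
    congr 1
    omega

theorem fold_both (xs : List Int) (f g : Int → List (Int × Int))
    (F G : List (Int × Int) → Int → List (Int × Int))
    (hF : ∀ acc x, F acc x = acc ++ f x) (hG : ∀ acc x, G acc x = acc ++ g x)
    (hfg : ∀ x, f x = g x) : xs.foldl F [] = xs.foldl G [] := by
  have h1 : xs.foldl F [] = xs.foldl (fun acc x => acc ++ f x) [] :=
    PySem.List.foldl_congr_mem _ _ _ _ (fun acc x _ => hF acc x)
  have h2 : xs.foldl G [] = xs.foldl (fun acc x => acc ++ g x) [] :=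
    PySem.List.foldl_congr_mem _ _ _ _ (fun acc x _ => hG acc x)
  rw [h1, h2, PySem.List.foldl_append_eq_flatMap, PySem.List.foldl_append_eq_flatMap]
  rw [funext hfg]

-- ===== VERDICT (by name: the statement is the Claim_ definition above) =====
theorem pixels_in_triangle_spec : Claim_equal_pixels_in_triangle := by
  intro v1 v2 v3 _ _
  unfold Spec_pixels_in_triangle pixels_in_triangle pixels_in_triangle_alt
  dsimp only
  generalize PySem.List.pyGetD v1 0 0 = g1
  generalize PySem.List.pyGetD v1 1 0 = g2
  generalize PySem.List.pyGetD v2 0 0 = g3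
  generalize PySem.List.pyGetD v2 1 0 = g4
  generalize PySem.List.pyGetD v3 0 0 = g5
  generalize PySem.List.pyGetD v3 1 0 = g6
  refine fold_both _
    (fun x => ((PySem.List.pyRange (min g2 (min g4 g6)) (max g2 (max g4 g6) + 1) 1).filter
        (fun y => pvPointInTriangle (x, y) (g1, g2) (g3, g4) (g5, g6))).map (fun y => (x, y)))
    (fun x =>
      if pvFindLo (fun y => pvInside g1 g2 g3 g4 g5 g6 x y) (min g2 (min g4 g6))
            (max g2 (max g4 g6)) > max g2 (max g4 g6) then []
      else (PySem.List.pyRange (pvFindLo (fun y => pvInside g1 g2 g3 g4 g5 g6 x y)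
              (min g2 (min g4 g6)) (max g2 (max g4 g6)))
              (pvFindHi (fun y => pvInside g1 g2 g3 g4 g5 g6 x y) (max g2 (max g4 g6))
                (pvFindLo (fun y => pvInside g1 g2 g3 g4 g5 g6 x y)
                  (min g2 (min g4 g6)) (max g2 (max g4 g6))) + 1) 1).map (fun y => (x, y)))
    _ _ (fun acc x => ?_) (fun acc x => ?_) (fun x => ?_)
  · exact PySem.List.foldl_append_if _ _ _ _
  · dsimp only
    split_ifs with h
    · exact (List.append_nil acc).symm
    · rfl
  · have hpe : (fun y => pvPointInTriangle (x, y) (g1, g2) (g3, g4) (g5, g6)) =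
        (fun y => pvInside g1 g2 g3 g4 g5 g6 x y) :=
      funext (fun y => pointInTriangle_eq_inside _ _ _ _ _ _ x y)
    dsimp only
    rw [hpe, column_eq_gen _
      (fun y1 y2 y h1 h2 hp1 hp2 => pvInside_convex _ _ _ _ _ _ _ y1 y2 y h1 h2 hp1 hp2) _ _]
    split_ifs with h
    · rfl
    · rfl
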